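-- pv_equiv track=rewrite | github.com/animeshokhade/dsa | scaler/Search in a row wise and column wise sorted matrix.py | solve
-- ===== SOURCE A (Python) =====
-- def solve(A, B):
--     ans = float('inf')
--     update = False
--     for row in range(len(A)):
--         for col in range(len(A[0])):
--             if A[row][col] == B:
--                 ans = min(ans, ((row + 1) * 1009) + col + 1)
--                 update = True
--     if update:
--         return ans
--     return -1
-- ===== SOURCE B (Python) =====
-- def solve(A, B):
--     # Only the leftmost match in a row can matter (the encoding grows with
--     # the column), so collect the first occurrence of B per row and take the
--     # minimum encoding; -1 if B does not occur.
--     candidates = [(r + 1) * 1009 + row.index(B) + 1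
--                   for r, row in enumerate(A) if B in row]
--     return min(candidates) if candidates else -1
-- ===== Notes on version B (the rewrite author's own statement) =====
-- stated objective: simpler
-- what changed: Replaces the nested full scan with a running min/flag by a per-row first-occurrence lookup followed by min over the per-row candidates; Pre_ excludes ragged inputs where a row is shorter than the first row (A raises IndexError) or the target occurs beyond the first row's width, in cells A's len(A[0]) column bound silently never inspects.
-- outside the precondition, e.g. on solve([[1, 2], [3, 4, 5]], 5): A returns -1, B returns 2021
import Mathlib
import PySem

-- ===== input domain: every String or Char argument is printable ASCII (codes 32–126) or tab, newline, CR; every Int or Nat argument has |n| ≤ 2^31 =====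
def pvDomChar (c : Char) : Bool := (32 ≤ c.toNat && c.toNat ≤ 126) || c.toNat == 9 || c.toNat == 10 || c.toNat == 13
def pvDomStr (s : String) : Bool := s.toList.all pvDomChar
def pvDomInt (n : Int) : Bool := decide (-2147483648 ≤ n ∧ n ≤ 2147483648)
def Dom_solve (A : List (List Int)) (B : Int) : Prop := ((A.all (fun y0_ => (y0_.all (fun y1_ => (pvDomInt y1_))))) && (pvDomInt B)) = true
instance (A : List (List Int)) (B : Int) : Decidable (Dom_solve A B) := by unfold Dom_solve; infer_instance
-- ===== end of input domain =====

-- B replaces the nested scan with per-row first occurrence + min of candidates; return value only.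

-- ===== PORT A =====
-- `none` encodes Python's state (ans = inf, update = False); `some a` encodes (ans = a, update = True).
def pyMinInf (acc : Option Int) (v : Int) : Option Int :=
  some (match acc with | none => v | some a => min a v)

def solve (A : List (List Int)) (B : Int) : Int :=
  let res : Option Int :=
    (PySem.List.pyRange 0 (A.length : Int) 1).foldl (fun acc row =>
      (PySem.List.pyRange 0 (((A.headD []).length : Nat) : Int) 1).foldl (fun acc2 col =>
        if PySem.List.pyGetD (PySem.List.pyGetD A row []) col (B + 1) = B then
          pyMinInf acc2 ((row + 1) * 1009 + col + 1)
        else acc2) acc) none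
  match res with
  | some a => a
  | none => -1

-- ===== PORT B =====
def solve_alt (A : List (List Int)) (B : Int) : Int :=
  let candidates : List Int :=
    (PySem.List.enumerate A).filterMap (fun rc =>
      match PySem.List.index? rc.2 B with
      | some c => some ((rc.1 + 1) * 1009 + (c : Int) + 1)
      | none => none)
  match PySem.List.min? candidates (fun x => x) with
  | some v => v
  | none => -1

-- ===== PRECONDITION & SPEC =====
-- Pre_ excludes inputs where some row is shorter than the first row (A raises IndexError)
-- and inputs where the target occurs in a row beyond the first row's width — cells A's
-- len(A[0]) column bound silently never inspects, so on such ragged input either reading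
-- (ignore or count those cells) is defensible.
def Pre_solve (A : List (List Int)) (B : Int) : Prop :=
  ∀ row ∈ A, (A.headD []).length ≤ row.length ∧ B ∉ row.drop (A.headD []).length
instance (A : List (List Int)) (B : Int) : Decidable (Pre_solve A B) := by unfold Pre_solve; infer_instance

def pvWitness_solve : List (List Int) × Int := ([[1, 2], [3, 4]], 3)

def Spec_solve (A : List (List Int)) (B : Int) (out : Int) : Prop := out = solve_alt A B
instance (A : List (List Int)) (B : Int) (out : Int) : Decidable (Spec_solve A B out) := by unfold Spec_solve; infer_instance

-- ===== CLAIM (what is proved, stated in full; the proofs are below) =====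
def Claim_equal_solve : Prop := ∀ (A : List (List Int)) (B : Int), Dom_solve A B → Pre_solve A B → Spec_solve A B (solve A B)

-- ===== LEMMAS AND PROOFS =====

-- Reference recursion for A's inner loop over the row.
def innerGo (B base : Int) : List Int → Int → Option Int → Option Int
  | [], _, acc => acc
  | x :: t, c, acc => innerGo B base t (c + 1) (if x = B then pyMinInf acc (base + c + 1) else acc)

theorem innerGo_some_of_le (B base : Int) :
    ∀ (xs : List Int) (c : Int) (a : Int), a ≤ base + c →
      innerGo B base xs c (some a) = some a := by
  intro xs
  induction xs with
  | nil => intro c a h; rfl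
  | cons x t ih =>
    intro c a h
    simp only [innerGo]
    by_cases hx : x = B
    · simp only [hx, pyMinInf]
      have : min a (base + c + 1) = a := by omega
      rw [this]
      exact ih (c + 1) a (by omega)
    · rw [if_neg hx]
      exact ih (c + 1) a (by omega)

theorem innerGo_eq_index? (B base : Int) :
    ∀ (xs : List Int) (c : Int) (acc : Option Int),
      innerGo B base xs c acc =
        match PySem.List.index? xs B with
        | none => acc
        | some k => pyMinInf acc (base + c + (k : Int) + 1) := by
  intro xs
  induction xs with
  | nil => intro c acc; rfl
  | cons x t ih =>
    intro c acc
    by_cases hx : x = B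
    · subst hx
      rw [PySem.List.index?_cons_self]
      simp only [innerGo, if_true]
      have h1 : innerGo x base t (c + 1) (pyMinInf acc (base + c + 1)) = pyMinInf acc (base + c + 1) := by
        cases acc with
        | none => exact innerGo_some_of_le x base t (c + 1) (base + c + 1) (by omega)
        | some a => exact innerGo_some_of_le x base t (c + 1) (min a (base + c + 1)) (by omega)
      rw [h1]
      simp [pyMinInf]
    · rw [PySem.List.index?_cons_of_ne t hx]
      simp only [innerGo, if_neg hx]
      rw [ih (c + 1) acc]
      cases hk : PySem.List.index? t B with
      | none => simp
      | some k =>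
        simp only [Option.map_some]
        have : base + (c + 1) + (k : Int) + 1 = base + c + ((k + 1 : Nat) : Int) + 1 := by push_cast; ring
        rw [this]

-- A's inner loop over range(m) equals innerGo on row.take m.
theorem inner_fold_eq (row : List Int) (base B d : Int) :
    ∀ (n a : Nat) (acc : Option Int), a + n ≤ row.length →
      (PySem.List.pyRange (a : Int) ((a + n : Nat) : Int) 1).foldl
        (fun acc2 col => if PySem.List.pyGetD row col d = B then pyMinInf acc2 (base + col + 1) else acc2) acc
      = innerGo B base ((row.drop a).take n) (a : Int) acc := by
  intro n
  induction n with
  | zero =>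
    intro a acc _
    rw [PySem.List.pyRange_one_eq_nil (by simp)]
    simp [List.foldl_nil, List.take_zero, innerGo]
  | succ n ih =>
    intro a acc h
    have ha : a < row.length := by omega
    have hcons : PySem.List.pyRange (a : Int) ((a + (n + 1) : Nat) : Int) 1
        = (a : Int) :: PySem.List.pyRange ((a : Int) + 1) ((a + (n + 1) : Nat) : Int) 1 := by
      apply PySem.List.pyRange_one_cons
      push_cast; omega
    rw [hcons]
    simp only [List.foldl_cons]
    have hget : PySem.List.pyGetD row (a : Int) d = row[a] := by
      rw [PySem.List.pyGetD_natCast]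
      exact List.getD_eq_getElem row d ha
    have hdrop : row.drop a = row[a] :: row.drop (a + 1) := List.drop_eq_getElem_cons ha
    rw [hdrop]
    simp only [List.take_succ_cons, innerGo]
    have hcast : ((a : Int) + 1) = ((a + 1 : Nat) : Int) := by push_cast; ring
    have hcast2 : ((a + (n + 1) : Nat) : Int) = (((a + 1) + n : Nat) : Int) := by push_cast; ring
    rw [hget, hcast, hcast2, ih (a + 1) _ (by omega)]

-- Folding the per-row combining step equals the running min of the filterMap'd candidates.
def minsOf (l : List Int) : Option Int := l.foldl (fun a v => pyMinInf a v) none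

theorem foldl_pyMinInf_some (t : List Int) : ∀ (a : Int),
    t.foldl (fun acc v => pyMinInf acc v) (some a) = some (t.foldl min a) := by
  induction t with
  | nil => intro a; rfl
  | cons x t ih => intro a; simp only [List.foldl_cons, pyMinInf]; exact ih (min a x)

theorem min_foldl_min (v : Int) : ∀ (s : List Int) (y : Int),
    min v (s.foldl min y) = s.foldl min (min v y) := by
  intro s
  induction s with
  | nil => intro y; rfl
  | cons z s ih =>
    intro y
    simp only [List.foldl_cons]
    rw [ih (min y z), min_assoc]

theorem foldl_match_eq_minsOf {α : Type} (f : α → Option Int) :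
    ∀ (l : List α) (acc : Option Int),
      l.foldl (fun acc x => match f x with | none => acc | some v => pyMinInf acc v) acc
      = match minsOf (l.filterMap f) with
        | none => acc
        | some v => pyMinInf acc v := by
  intro l
  induction l with
  | nil => intro acc; rfl
  | cons x t ih =>
    intro acc
    simp only [List.foldl_cons, List.filterMap_cons]
    cases hx : f x with
    | none => exact ih acc
    | some v =>
      rw [ih (pyMinInf acc v)]
      cases hl : t.filterMap f with
      | nil => rfl
      | cons y s =>
        have h1 : minsOf (y :: s) = some (s.foldl min y) := by
          simp only [minsOf, List.foldl_cons]
          exact foldl_pyMinInf_some s y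
        have h2 : minsOf (v :: y :: s) = some (s.foldl min (min v y)) := by
          simp only [minsOf, List.foldl_cons]
          exact foldl_pyMinInf_some s (min v y)
        rw [h1, h2]
        rw [← min_foldl_min v s y]
        cases acc with
        | none => rfl
        | some a => simp only [pyMinInf]; rw [min_assoc]

theorem minsOf_eq_min? (l : List Int) :
    minsOf l = PySem.List.min? l (fun x => x) := by
  cases l with
  | nil => rfl
  | cons x t =>
    rw [PySem.List.min?_id_cons]
    simp only [minsOf, List.foldl_cons, pyMinInf]
    exact foldl_pyMinInf_some t x

theorem index?_append_not_mem (B : Int) (t : List Int) (ht : B ∉ t) :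
    ∀ (l : List Int), PySem.List.index? (l ++ t) B = PySem.List.index? l B := by
  intro l
  induction l with
  | nil =>
    simp only [List.nil_append]
    rw [(PySem.List.index?_eq_none_iff (xs := t) (v := B)).mpr ht]
    rfl
  | cons x l ih =>
    by_cases hx : x = B
    · subst hx
      rw [List.cons_append, PySem.List.index?_cons_self, PySem.List.index?_cons_self]
    · rw [List.cons_append, PySem.List.index?_cons_of_ne _ hx, PySem.List.index?_cons_of_ne _ hx, ih]

theorem solve_spec : Claim_equal_solve := by
  intro A B _ hpre
  unfold Spec_solve solve solve_alt
  simp only []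
  set m : Nat := (A.headD []).length with hm
  -- rewrite A's outer fold as a fold over enumerate A 0
  have hen : PySem.List.enumerate A 0
      = (PySem.List.pyRange 0 (A.length : Int) 1).map (fun j => (j, PySem.List.pyGetD A j [])) :=
    by
    have := PySem.List.enumerate_eq_map_pyRange A ([] : List Int)
    simpa [PySem.List.len] using this
  rw [hen, List.filterMap_map]
  -- pointwise: for each j in range, the inner fold equals the candidate step
  have key : ∀ (acc : Option Int) (j : Int), j ∈ PySem.List.pyRange 0 (A.length : Int) 1 →
      (PySem.List.pyRange 0 (m : Int) 1).foldl
        (fun acc2 col => if PySem.List.pyGetD (PySem.List.pyGetD A j []) col (B + 1) = B then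
          pyMinInf acc2 ((j + 1) * 1009 + col + 1) else acc2) acc
      = match (fun rc : Int × List Int =>
          match PySem.List.index? rc.2 B with
          | some c => some ((rc.1 + 1) * 1009 + (c : Int) + 1)
          | none => none) (j, PySem.List.pyGetD A j []) with
        | none => acc
        | some v => pyMinInf acc v := by
    intro acc j hj
    rw [PySem.List.mem_pyRange_one] at hj
    have hInR : PySem.Raise.InRange A.length j := by
      simp only [PySem.Raise.InRange]; omega
    set row := PySem.List.pyGetD A j [] with hrow
    have hrowmem : row ∈ A := PySem.List.pyGetD_mem A [] hInR
    obtain ⟨hlen, hnot⟩ := hpre row hrowmem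
    have h0 : (0 : Int) = ((0 : Nat) : Int) := rfl
    have hmi : ((m : Nat) : Int) = (((0 : Nat) + m : Nat) : Int) := by norm_num
    rw [h0, hmi, inner_fold_eq row ((j + 1) * 1009) B (B + 1) m 0 acc (by omega)]
    rw [innerGo_eq_index?]
    simp only [List.drop_zero, Nat.cast_zero]
    have htake : PySem.List.index? (row.take m) B = PySem.List.index? row B := by
      conv_rhs => rw [← List.take_append_drop m row]
      rw [index?_append_not_mem B _ hnot]
    rw [htake]
    cases hI : PySem.List.index? row B with
    | none => rfl
    | some k =>
      simp only []
      congr 1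
      ring
  -- apply key under the fold via congruence, then collapse with foldl_match_eq_minsOf
  have hfold : (PySem.List.pyRange 0 (A.length : Int) 1).foldl
      (fun acc j =>
        (PySem.List.pyRange 0 (m : Int) 1).foldl
          (fun acc2 col => if PySem.List.pyGetD (PySem.List.pyGetD A j []) col (B + 1) = B then
            pyMinInf acc2 ((j + 1) * 1009 + col + 1) else acc2) acc) none
      = (PySem.List.pyRange 0 (A.length : Int) 1).foldl
        (fun acc j =>
          match (fun rc : Int × List Int =>
            match PySem.List.index? rc.2 B with
            | some c => some ((rc.1 + 1) * 1009 + (c : Int) + 1)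
            | none => none) (j, PySem.List.pyGetD A j []) with
          | none => acc
          | some v => pyMinInf acc v) none := by
    apply PySem.List.foldl_congr_mem
    intro acc j hj
    exact key acc j hj
  rw [hfold]
  rw [foldl_match_eq_minsOf (fun j =>
      (fun rc : Int × List Int =>
        match PySem.List.index? rc.2 B with
        | some c => some ((rc.1 + 1) * 1009 + (c : Int) + 1)
        | none => none) (j, PySem.List.pyGetD A j []))]
  simp only [Function.comp_def]
  rw [← minsOf_eq_min?]
  cases minsOf _ with
  | none => rfl
  | some v => simp [pyMinInf]
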